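-- pv_equiv track=rewrite | github.com/stevenminhhoang/LeetCode | 523_continuous_subarray_sum.py | continuous_subarray_sum
-- ===== SOURCE A (Python) =====
-- def continuous_subarray_sum(nums, k):
--     dic = {}
--     dic[0] = -1
--     cSum = 0
--     for i in range(len(nums)):
--         cSum += nums[i]
--         if k != 0:
--             cSum = cSum % k
--         if cSum in dic:
--             if i - dic[cSum] > 1:
--                 return True
--
--         dic[cSum] = i
--
--     return False
-- ===== SOURCE B (Python) =====
-- def continuous_subarray_sum(nums, k):
--     n = len(nums)
--     for start in range(n):
--         total = 0
--         for end in range(start, n):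
--             total += nums[end]
--             if end - start >= 1:
--                 if k == 0:
--                     if total == 0:
--                         return True
--                 elif total % k == 0:
--                     return True
--     return False
-- ===== Notes on version B (the rewrite author's own statement) =====
-- stated objective: simpler
-- what changed: Replaced the prefix-residue hashmap scan by a plain brute force that, for each start index, accumulates the running sum over end indices and tests divisibility once the subarray has length >= 2 (raw sum == 0 when k == 0).
-- intended difference: On inputs where a length->=2 subarray summing to a multiple of k exists but every such occurrence is hidden because A overwrites dic[residue] with the latest index (e.g. [1,0,0] with k=5, or [5,5,5] with k=5), A wrongly returns False while B returns True, which is the intended answer to the problem. — e.g. on continuous_subarray_sum([1, 0, 0], 5): A returns false, B returns true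
import Mathlib
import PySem

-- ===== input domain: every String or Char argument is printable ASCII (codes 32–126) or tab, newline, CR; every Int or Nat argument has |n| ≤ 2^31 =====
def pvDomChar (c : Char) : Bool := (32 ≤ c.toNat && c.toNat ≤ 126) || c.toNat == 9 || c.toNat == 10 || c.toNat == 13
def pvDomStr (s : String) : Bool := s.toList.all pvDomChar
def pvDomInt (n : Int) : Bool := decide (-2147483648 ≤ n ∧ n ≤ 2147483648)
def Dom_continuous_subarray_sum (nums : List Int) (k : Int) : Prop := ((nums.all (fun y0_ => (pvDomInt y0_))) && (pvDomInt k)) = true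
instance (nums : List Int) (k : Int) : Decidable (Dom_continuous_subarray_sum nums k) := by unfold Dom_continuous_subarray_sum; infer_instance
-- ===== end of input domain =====

-- B replaces A's prefix-residue hashmap scan by a plain O(n^2) brute force over (start,end) pairs,
-- fixing A's overwrite bug (see D_ below); objective: simpler, not faster.


-- ===== PORT A =====
-- loop 'for i in range(len(nums))' as structural recursion on the unprocessed suffix of nums,
-- carrying dic, cSum and the index i
def pvALoop (k : Int) : List Int → PySem.Dict Int Int → Int → Int → Bool
  | [], _, _, _ => false
  | x :: rest, dic, cSum, i =>
    let c := cSum + x                                        -- cSum += nums[i]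
    let c2 := if k ≠ 0 then PySem.Int.mod c k else c         -- if k != 0: cSum = cSum % k
    match dic.get? c2 with                                   -- if cSum in dic:
    | some j =>
      if i - j > 1 then true                                 --   if i - dic[cSum] > 1: return True
      else pvALoop k rest (dic.insert c2 i) c2 (i + 1)       -- dic[cSum] = i
    | none => pvALoop k rest (dic.insert c2 i) c2 (i + 1)

def continuous_subarray_sum (nums : List Int) (k : Int) : Bool :=
  pvALoop k nums ((PySem.Dict.empty).insert 0 (-1)) 0 0      -- dic = {}; dic[0] = -1; cSum = 0

-- ===== PORT B =====
-- inner loop 'for end in range(start, n)': recursion on the remaining suffix, carrying total and end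
def pvBInner (k s : Int) : List Int → Int → Int → Bool
  | [], _, _ => false
  | x :: rest, total, e =>
    let t := total + x                                       -- total += nums[end]
    if e - s ≥ 1 ∧ (if k = 0 then t = 0 else PySem.Int.mod t k = 0) then true
    else pvBInner k s rest t (e + 1)

-- outer loop 'for start in range(n)': recursion on the suffix starting at start
def pvBOuter (k : Int) : List Int → Int → Bool
  | [], _ => false
  | x :: rest, s =>
    if pvBInner k s (x :: rest) 0 s then true
    else pvBOuter k rest (s + 1)

def continuous_subarray_sum_alt (nums : List Int) (k : Int) : Bool :=
  pvBOuter k nums 0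

-- ===== PRECONDITION & SPEC =====
-- prefix t closes a length-≥2 subarray whose sum is a multiple of k (for k = 0, '0 ∣ x' is 'x = 0',
-- matching A's raw-sum behaviour when k == 0)
def pvP (nums : List Int) (k : Int) (t : Nat) : Prop :=
  ∃ u < t - 1, k ∣ (nums.take t).sum - (nums.take u).sum

-- On inputs where a length-≥2 subarray summing to a multiple of k exists (first conjunct: the problem's
-- condition, B's answer True) but every prefix t closing such a subarray is preceded by an element that is
-- itself a multiple of k (so A's dict has overwritten the matching index), A wrongly returns False; B's
-- True is the intended answer.
def D_continuous_subarray_sum (nums : List Int) (k : Int) : Prop :=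
  (∃ t ≤ nums.length, pvP nums k t) ∧
    ∀ t ≤ nums.length, pvP nums k t → k ∣ nums.getD (t - 1) 0
instance (nums : List Int) (k : Int) : Decidable (D_continuous_subarray_sum nums k) := by
  unfold D_continuous_subarray_sum pvP; infer_instance

def Spec_continuous_subarray_sum (nums : List Int) (k : Int) (out : Bool) : Prop :=
  ¬ D_continuous_subarray_sum nums k → out = continuous_subarray_sum_alt nums k
instance (nums : List Int) (k : Int) (out : Bool) : Decidable (Spec_continuous_subarray_sum nums k out) := by
  unfold Spec_continuous_subarray_sum; infer_instance

def pvDiffWitness_continuous_subarray_sum : List Int × Int := ([1, 0, 0], 5)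
def pvDiffWitnessOut_continuous_subarray_sum : Bool × Bool := (false, true)

-- ===== CLAIM (what is proved, stated in full; the proofs are below) =====
def Claim_unchanged_continuous_subarray_sum : Prop := ∀ (nums : List Int) (k : Int), Dom_continuous_subarray_sum nums k → Spec_continuous_subarray_sum nums k (continuous_subarray_sum nums k)
def Claim_changed_continuous_subarray_sum : Prop := Dom_continuous_subarray_sum (pvDiffWitness_continuous_subarray_sum.1) (pvDiffWitness_continuous_subarray_sum.2) ∧ D_continuous_subarray_sum (pvDiffWitness_continuous_subarray_sum.1) (pvDiffWitness_continuous_subarray_sum.2) ∧ continuous_subarray_sum (pvDiffWitness_continuous_subarray_sum.1) (pvDiffWitness_continuous_subarray_sum.2) = pvDiffWitnessOut_continuous_subarray_sum.1 ∧ continuous_subarray_sum_alt (pvDiffWitness_continuous_subarray_sum.1) (pvDiffWitness_continuous_subarray_sum.2) = pvDiffWitnessOut_continuous_subarray_sum.2 ∧ pvDiffWitnessOut_continuous_subarray_sum.1 ≠ pvDiffWitnessOut_continuous_subarray_sum.2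
def Claim_exact_continuous_subarray_sum : Prop := ∀ (nums : List Int) (k : Int), Dom_continuous_subarray_sum nums k → D_continuous_subarray_sum nums k → continuous_subarray_sum nums k ≠ continuous_subarray_sum_alt nums k

-- ===== LEMMAS AND PROOFS =====

-- residue of the prefix sum of the first t elements, exactly as A tracks it (raw sum when k = 0)
def pvR (nums : List Int) (k : Int) (t : Nat) : Int :=
  if k = 0 then (nums.take t).sum else PySem.Int.mod ((nums.take t).sum) k

def pvPair (nums : List Int) (k : Int) (t2 : Nat) : Prop :=
  ∃ t1 < t2, t1 + 2 ≤ t2 ∧ pvR nums k t1 = pvR nums k t2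

def pvBexists (nums : List Int) (k : Int) : Prop := ∃ t2 ≤ nums.length, pvPair nums k t2
def pvAexists (nums : List Int) (k : Int) : Prop :=
  ∃ t2 ≤ nums.length, pvPair nums k t2 ∧ pvR nums k t2 ≠ pvR nums k (t2 - 1)

theorem pymod_eq_pymod_iff_dvd (a b k : Int) :
    PySem.Int.mod a k = PySem.Int.mod b k ↔ k ∣ (a - b) := by
  simp only [PySem.Int.mod]
  rw [Int.fmod_eq_fmod_iff_fmod_sub_eq_zero]
  exact PySem.Int.mod_eq_zero_iff_dvd _ _

theorem pymod_add_left (a b k : Int) :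
    PySem.Int.mod (PySem.Int.mod a k + b) k = PySem.Int.mod (a + b) k := by
  rw [pymod_eq_pymod_iff_dvd]
  exact ⟨-(a.fdiv k), by have := Int.fmod_add_mul_fdiv a k; simp only [PySem.Int.mod]; linarith⟩

-- residues equal ↔ the subarray sum "hits" (raw 0 when k = 0, divisible by k otherwise)
theorem pvR_eq_iff (nums : List Int) (k : Int) (t1 t2 : Nat) :
    pvR nums k t1 = pvR nums k t2 ↔
      (if k = 0 then ((nums.take t2).sum - (nums.take t1).sum) = 0
       else PySem.Int.mod ((nums.take t2).sum - (nums.take t1).sum) k = 0) := by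
  unfold pvR
  by_cases hk : k = 0
  · simp [hk]; omega
  · simp only [hk, if_false]
    rw [pymod_eq_pymod_iff_dvd, PySem.Int.mod_eq_zero_iff_dvd]
    constructor
    · intro h; exact (dvd_sub_comm).mp h
    · intro h; exact (dvd_sub_comm).mp h

theorem pvR_zero (nums : List Int) (k : Int) : pvR nums k 0 = 0 := by
  unfold pvR
  by_cases hk : k = 0 <;> simp [hk, PySem.Int.mod]

theorem pvR_succ (nums : List Int) (k : Int) (m : Nat) (hm : m < nums.length) :
    (if k ≠ 0 then PySem.Int.mod (pvR nums k m + nums[m]) k else pvR nums k m + nums[m])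
      = pvR nums k (m + 1) := by
  have htake : (nums.take (m + 1)).sum = (nums.take m).sum + nums[m] := by
    rw [List.take_add_one, List.sum_append]
    simp [List.getElem?_eq_getElem hm]
  unfold pvR
  by_cases hk : k = 0
  · simp [hk, htake]
  · simp only [hk, ne_eq, not_false_iff, if_true, if_false]
    rw [pymod_add_left, htake]

theorem dvd_iff_pvR_eq (nums : List Int) (k : Int) (u t : Nat) :
    k ∣ (nums.take t).sum - (nums.take u).sum ↔ pvR nums k u = pvR nums k t := by
  rw [pvR_eq_iff]
  by_cases hk : k = 0
  · simp [hk, zero_dvd_iff]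
  · simp [hk, PySem.Int.mod_eq_zero_iff_dvd]

theorem pvP_iff_pvPair (nums : List Int) (k : Int) (t : Nat) :
    pvP nums k t ↔ pvPair nums k t := by
  unfold pvP pvPair
  constructor
  · rintro ⟨u, hu, hd⟩
    exact ⟨u, by omega, by omega, (dvd_iff_pvR_eq nums k u t).mp hd⟩
  · rintro ⟨u, hu, h2, he⟩
    exact ⟨u, by omega, (dvd_iff_pvR_eq nums k u t).mpr he⟩

theorem take_sum_succ (nums : List Int) (m : Nat) (hm : m < nums.length) :
    (nums.take (m + 1)).sum = (nums.take m).sum + nums[m] := by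
  rw [List.take_add_one, List.sum_append]
  simp [List.getElem?_eq_getElem hm]

theorem dvd_getD_iff (nums : List Int) (k : Int) (t : Nat) (h2 : 2 ≤ t) (hn : t ≤ nums.length) :
    (k ∣ nums.getD (t - 1) 0 ↔ pvR nums k t = pvR nums k (t - 1)) := by
  have hm : t - 1 < nums.length := by omega
  have hs : (nums.take (t - 1 + 1)).sum = (nums.take (t - 1)).sum + nums[t - 1] :=
    take_sum_succ nums (t - 1) hm
  have ht1 : t - 1 + 1 = t := by omega
  rw [ht1] at hs
  rw [List.getD_eq_getElem nums 0 hm]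
  rw [show (nums[t - 1] : Int) = (nums.take t).sum - (nums.take (t - 1)).sum by omega]
  rw [dvd_iff_pvR_eq]
  exact comm

theorem D_iff (nums : List Int) (k : Int) :
    D_continuous_subarray_sum nums k ↔ pvBexists nums k ∧ ¬ pvAexists nums k := by
  unfold D_continuous_subarray_sum pvBexists pvAexists
  constructor
  · rintro ⟨⟨t, ht, hp⟩, hall⟩
    refine ⟨⟨t, ht, (pvP_iff_pvPair nums k t).mp hp⟩, ?_⟩
    rintro ⟨t2, h1, h2, h3⟩
    have hp2 := (pvP_iff_pvPair nums k t2).mpr h2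
    have h22 : 2 ≤ t2 := by obtain ⟨u, -, hu, -⟩ := h2; omega
    exact h3 ((dvd_getD_iff nums k t2 h22 h1).mp (hall t2 h1 hp2))
  · rintro ⟨⟨t, ht, hp⟩, hna⟩
    refine ⟨⟨t, ht, (pvP_iff_pvPair nums k t).mpr hp⟩, ?_⟩
    intro t2 h1 hp2
    have hpair := (pvP_iff_pvPair nums k t2).mp hp2
    have h22 : 2 ≤ t2 := by obtain ⟨u, -, hu, -⟩ := hpair; omega
    rw [dvd_getD_iff nums k t2 h22 h1]
    by_contra hne
    exact hna ⟨t2, h1, hpair, hne⟩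

-- ---- B characterization ----

def pvHit (k v : Int) : Prop := if k = 0 then v = 0 else PySem.Int.mod v k = 0

theorem pvBInner_char (k s : Int) :
    ∀ (l : List Int) (total e : Int),
      pvBInner k s l total e = true ↔
        ∃ t : Nat, t < l.length ∧ 1 ≤ e + t - s ∧ pvHit k (total + (l.take (t + 1)).sum) := by
  intro l
  induction l with
  | nil => intro total e; simp [pvBInner]
  | cons x rest ih =>
    intro total e
    simp only [pvBInner]
    by_cases hc : e - s ≥ 1 ∧ (if k = 0 then total + x = 0 else PySem.Int.mod (total + x) k = 0)
    · simp only [if_pos hc, true_iff]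
      refine ⟨0, by simp, by omega, ?_⟩
      simpa [pvHit] using hc.2
    · rw [if_neg hc, ih]
      constructor
      · rintro ⟨t, ht, h1, h2⟩
        refine ⟨t + 1, by simpa using ht, by omega, ?_⟩
        simpa [List.take_succ_cons, add_assoc] using h2
      · rintro ⟨t, ht, h1, h2⟩
        cases t with
        | zero =>
          exfalso; apply hc
          constructor
          · omega
          · simpa [pvHit] using h2
        | succ t' =>
          refine ⟨t', by simpa using ht, by omega, ?_⟩
          simpa [List.take_succ_cons, add_assoc] using h2

theorem pvBOuter_char (k : Int) :
    ∀ (l : List Int) (s : Int),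
      pvBOuter k l s = true ↔
        ∃ j : Nat, j < l.length ∧ pvBInner k (s + j) (l.drop j) 0 (s + j) = true := by
  intro l
  induction l with
  | nil => intro s; simp [pvBOuter]
  | cons x rest ih =>
    intro s
    simp only [pvBOuter]
    by_cases hc : pvBInner k s (x :: rest) 0 s = true
    · simp only [if_pos hc, true_iff]
      exact ⟨0, by simp, by simpa using hc⟩
    · rw [if_neg hc, ih]
      constructor
      · rintro ⟨j, hj, h⟩
        refine ⟨j + 1, by simpa using hj, ?_⟩
        have : s + 1 + (j : Int) = s + (j + 1 : Nat) := by push_cast; ring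
        rw [this] at h
        simpa using h
      · rintro ⟨j, hj, h⟩
        cases j with
        | zero => exact absurd (by simpa using h) hc
        | succ j' =>
          refine ⟨j', by simpa using hj, ?_⟩
          have : s + 1 + (j' : Int) = s + (j' + 1 : Nat) := by push_cast; ring
          rw [this]
          simpa using h

theorem take_drop_sum (l : List Int) (j m : Nat) :
    ((l.drop j).take m).sum = (l.take (j + m)).sum - (l.take j).sum := by
  rw [List.take_add, List.sum_append]; ring

theorem alt_iff (nums : List Int) (k : Int) :
    continuous_subarray_sum_alt nums k = true ↔ pvBexists nums k := by
  unfold continuous_subarray_sum_alt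
  rw [pvBOuter_char]
  unfold pvBexists pvPair
  constructor
  · rintro ⟨j, hj, h⟩
    rw [pvBInner_char] at h
    obtain ⟨t, ht, h1, h2⟩ := h
    have hlen : t < nums.length - j := by simpa using ht
    have ht1 : 1 ≤ (t : Int) := by omega
    refine ⟨j + t + 1, by omega, j, by omega, by omega, ?_⟩
    rw [pvR_eq_iff]
    rw [take_drop_sum] at h2
    have hj1 : j + (t + 1) = j + t + 1 := by omega
    rw [hj1] at h2
    simpa [pvHit] using h2
  · rintro ⟨t2, ht2, t1, ht1, hle, heq⟩
    refine ⟨t1, by omega, ?_⟩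
    rw [pvBInner_char]
    refine ⟨t2 - t1 - 1, by rw [List.length_drop]; omega, by omega, ?_⟩
    rw [take_drop_sum]
    have h3 : t1 + (t2 - t1 - 1 + 1) = t2 := by omega
    rw [h3]
    rw [pvR_eq_iff] at heq
    simpa [pvHit] using heq

-- ---- A characterization ----

-- invariant of A's dictionary before processing index m: dic maps each residue v to (t - 1) where
-- t is the LARGEST prefix index ≤ m whose residue is v (the initial dic[0] = -1 is the case t = 0)
def pvInv (nums : List Int) (k : Int) (m : Nat) (dic : PySem.Dict Int Int) : Prop :=
  ∀ v j, dic.get? v = some j ↔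
    ∃ t : Nat, t ≤ m ∧ j = (t : Int) - 1 ∧ pvR nums k t = v ∧
      ∀ u : Nat, t < u → u ≤ m → pvR nums k u ≠ v

def pvAFrom (nums : List Int) (k : Int) (m : Nat) : Prop :=
  ∃ t2, m < t2 ∧ t2 ≤ nums.length ∧ pvR nums k t2 ≠ pvR nums k (t2 - 1) ∧
    ∃ t1, t1 + 2 ≤ t2 ∧ pvR nums k t1 = pvR nums k t2

theorem exists_max_le (P : Nat → Prop) [DecidablePred P] (m : Nat) (h : ∃ t, t ≤ m ∧ P t) :
    ∃ t, t ≤ m ∧ P t ∧ ∀ u, t < u → u ≤ m → ¬ P u := by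
  obtain ⟨t0, ht0, hp0⟩ := h
  refine ⟨Nat.findGreatest P m, Nat.findGreatest_le m, Nat.findGreatest_spec ht0 hp0, ?_⟩
  intro u hu hum
  exact Nat.findGreatest_is_greatest hu hum

theorem pvInv_init (nums : List Int) (k : Int) :
    pvInv nums k 0 ((PySem.Dict.empty).insert 0 (-1)) := by
  intro v j
  have : ((PySem.Dict.empty : PySem.Dict Int Int).insert 0 (-1)) = PySem.Dict.mk [(0, -1)] := rfl
  rw [this, PySem.Dict.get?_mk_cons]
  constructor
  · intro h
    by_cases h0 : ((0 : Int) == v) = true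
    · simp only [h0, if_true] at h
      have hj : j = -1 := by injection h with h'; omega
      refine ⟨0, le_refl _, by omega, ?_, by omega⟩
      rw [pvR_zero]
      exact (by simpa using h0 : (0 : Int) = v)
    · simp only [h0] at h
      exact absurd h (by simp [PySem.Dict.get?])
  · rintro ⟨t, ht, hj, htv, -⟩
    interval_cases t
    rw [pvR_zero] at htv
    simp [← htv, hj]

theorem pvInv_insert (nums : List Int) (k : Int) (m : Nat) (dic : PySem.Dict Int Int)
    (hinv : pvInv nums k m dic) :
    pvInv nums k (m + 1) (dic.insert (pvR nums k (m + 1)) (m : Int)) := by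
  intro v j
  rw [PySem.Dict.get?_insert]
  by_cases hv : v = pvR nums k (m + 1)
  · simp only [hv, if_true]
    constructor
    · intro h
      have hj : j = (m : Int) := by simpa using h.symm
      exact ⟨m + 1, le_refl _, by omega, rfl, fun u h1 h2 _ => by omega⟩
    · rintro ⟨t, ht, hj, htv, hmax⟩
      have htm : t = m + 1 := by
        by_contra hne
        exact hmax (m + 1) (by omega) (le_refl _) rfl
      subst htm
      simp [hj]
  · rw [if_neg hv, hinv]
    constructor
    · rintro ⟨t, ht, hj, htv, hmax⟩
      refine ⟨t, by omega, hj, htv, ?_⟩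
      intro u h1 h2
      rcases Nat.lt_or_ge u (m + 1) with h | h
      · exact hmax u h1 (by omega)
      · have : u = m + 1 := by omega
        rw [this]
        intro hc
        exact hv (hc ▸ rfl)
    · rintro ⟨t, ht, hj, htv, hmax⟩
      have htm : t ≤ m := by
        rcases Nat.lt_or_ge t (m + 1) with h | h
        · omega
        · exfalso
          have : t = m + 1 := by omega
          exact hv (by rw [← htv, this])
      exact ⟨t, htm, hj, htv, fun u h1 h2 => hmax u h1 (by omega)⟩

theorem pvAFrom_step (nums : List Int) (k : Int) (m : Nat)
    (hne : ¬ (pvR nums k (m + 1) ≠ pvR nums k m ∧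
              ∃ t1, t1 + 2 ≤ m + 1 ∧ pvR nums k t1 = pvR nums k (m + 1))) :
    (pvAFrom nums k m ↔ pvAFrom nums k (m + 1)) := by
  constructor
  · rintro ⟨t2, h1, h2, h3, t1, h4, h5⟩
    rcases Nat.lt_or_ge (m + 1) t2 with h | h
    · exact ⟨t2, h, h2, h3, t1, h4, h5⟩
    · exfalso
      have ht2 : t2 = m + 1 := by omega
      subst ht2
      exact hne ⟨by simpa using h3, t1, h4, h5⟩
  · rintro ⟨t2, h1, h2, h3, t1, h4, h5⟩
    exact ⟨t2, by omega, h2, h3, t1, h4, h5⟩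

theorem pvALoop_char (nums : List Int) (k : Int) :
    ∀ (l : List Int) (m : Nat) (dic : PySem.Dict Int Int),
      l = nums.drop m → pvInv nums k m dic →
      (pvALoop k l dic (pvR nums k m) (m : Int) = true ↔ pvAFrom nums k m) := by
  intro l
  induction l with
  | nil =>
    intro m dic hl _
    have hm : nums.length ≤ m := by
      have := List.drop_eq_nil_iff.mp hl.symm
      omega
    simp only [pvALoop, Bool.false_eq_true, false_iff]
    rintro ⟨t2, h1, h2, _⟩; omega
  | cons x rest ih =>
    intro m dic hl hinv
    have hm : m < nums.length := by
      by_contra h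
      rw [List.drop_eq_nil_of_le (by omega)] at hl
      cases hl
    have hdrop := List.drop_eq_getElem_cons (l := nums) hm
    rw [← hl] at hdrop
    have hx : x = nums[m] := by injection hdrop
    have hrest : rest = nums.drop (m + 1) := by injection hdrop
    have hc2 : (if k ≠ 0 then PySem.Int.mod (pvR nums k m + x) k else pvR nums k m + x)
        = pvR nums k (m + 1) := by rw [hx]; exact pvR_succ nums k m hm
    have hinv' := pvInv_insert nums k m dic hinv
    have hcast : ((m : Int) + 1) = ((m + 1 : Nat) : Int) := by push_cast; ring
    have ihr := ih (m + 1) (dic.insert (pvR nums k (m + 1)) (m : Int)) hrest hinv'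
    simp only [pvALoop, hc2]
    cases hget : dic.get? (pvR nums k (m + 1)) with
    | some j =>
      dsimp only
      obtain ⟨t, htm, hj, htv, hmax⟩ := (hinv (pvR nums k (m + 1)) j).mp hget
      by_cases hgt : (m : Int) - j > 1
      · rw [if_pos hgt]
        simp only [true_iff]
        have htltm : t < m := by omega
        have hne : pvR nums k (m + 1) ≠ pvR nums k m := fun hc =>
          hmax m htltm (le_refl m) hc.symm
        exact ⟨m + 1, by omega, by omega, by simpa using hne, t, by omega, htv⟩
      · rw [if_neg hgt, hcast, ihr]
        have htem : t = m := by omega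
        have heqR : pvR nums k (m + 1) = pvR nums k m := by rw [← htv, htem]
        exact (pvAFrom_step nums k m (fun hc => hc.1 heqR)).symm
    | none =>
      dsimp only
      have hnomatch : ¬ ∃ t1, t1 ≤ m ∧ pvR nums k t1 = pvR nums k (m + 1) := by
        rintro hex
        obtain ⟨t, ht, htv, hmax⟩ :=
          exists_max_le (fun t => pvR nums k t = pvR nums k (m + 1)) m hex
        have := (hinv (pvR nums k (m + 1)) ((t : Int) - 1)).mpr
          ⟨t, ht, rfl, htv, fun u h1 h2 hc => hmax u h1 h2 hc⟩
        rw [hget] at this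
        cases this
      rw [hcast, ihr]
      refine (pvAFrom_step nums k m ?_).symm
      rintro ⟨-, t1, h4, h5⟩
      exact hnomatch ⟨t1, by omega, h5⟩

theorem a_iff (nums : List Int) (k : Int) :
    continuous_subarray_sum nums k = true ↔ pvAexists nums k := by
  unfold continuous_subarray_sum
  have h0 : (0 : Int) = pvR nums k 0 := (pvR_zero nums k).symm
  have hch := pvALoop_char nums k nums 0 ((PySem.Dict.empty).insert 0 (-1)) rfl (pvInv_init nums k)
  rw [pvR_zero] at hch
  rw [show ((0 : Nat) : Int) = (0 : Int) from rfl] at hch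
  rw [hch]
  unfold pvAFrom pvAexists pvPair
  constructor
  · rintro ⟨t2, h1, h2, h3, t1, h4, h5⟩
    exact ⟨t2, by omega, ⟨t1, by omega, h4, h5⟩, h3⟩
  · rintro ⟨t2, h1, ⟨t1, h2, h4, h5⟩, h3⟩
    exact ⟨t2, by omega, by omega, h3, t1, h4, h5⟩

theorem aexists_imp_bexists (nums : List Int) (k : Int) :
    pvAexists nums k → pvBexists nums k := by
  rintro ⟨t2, h2, hp, -⟩
  exact ⟨t2, h2, hp⟩

-- ===== VERDICT (by name: the statement is the Claim_ definition above) =====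
theorem continuous_subarray_sum_spec : Claim_unchanged_continuous_subarray_sum := by
  intro nums k _ hnd
  by_cases ha : pvAexists nums k
  · rw [(a_iff nums k).mpr ha, ((alt_iff nums k).mpr (aexists_imp_bexists nums k ha)).symm]
  · have hA : continuous_subarray_sum nums k = false := by
      rw [← Bool.not_eq_true, a_iff]; exact ha
    have hnb : ¬ pvBexists nums k := by
      intro hb
      exact hnd ((D_iff nums k).mpr ⟨hb, ha⟩)
    have hB : continuous_subarray_sum_alt nums k = false := by
      rw [← Bool.not_eq_true, alt_iff]; exact hnb
    rw [hA, hB]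

theorem continuous_subarray_sum_changed : Claim_changed_continuous_subarray_sum := by
  unfold Claim_changed_continuous_subarray_sum; decide

theorem continuous_subarray_sum_tight : Claim_exact_continuous_subarray_sum := by
  intro nums k _ hd
  obtain ⟨hb, hna⟩ := (D_iff nums k).mp hd
  have hA : continuous_subarray_sum nums k = false := by
    rw [← Bool.not_eq_true, a_iff]; exact hna
  have hB : continuous_subarray_sum_alt nums k = true := (alt_iff nums k).mpr hb
  rw [hA, hB]; simp
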